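-- pv_equiv track=rewrite | github.com/AriannaBi/Algorithms-Data-Structures | exercise/193.py | Group_Of_Equals
-- ===== SOURCE A (Python) =====
-- def Group_Of_Equals(B, k):
--     B.sort()
--     i = 0
--     j = 1
--     while j < len(B):
--         if B[i] == B[j]:
--             if (j - i) + 1 >= k:
--                 return True
--             j = j + 1
--         else:
--             i = j
--             j = j + 1
--     return False
-- ===== SOURCE B (Python) =====
-- def Group_Of_Equals(B, k):
--     B.sort()  # kept only to preserve A's observable in-place mutation of B
--     counts = {}
--     for x in B:
--         counts[x] = counts.get(x, 0) + 1
--     return any(c >= 2 and c >= k for c in counts.values())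
-- ===== Notes on version B (the rewrite author's own statement) =====
-- stated objective: alternative
-- what changed: Replaces A's sorted-run two-pointer scan with a hash-map frequency count: build a dict of multiplicities in one pass and answer whether any value occurs at least twice and at least k times; the answer no longer depends on sorting (B.sort() is kept only for A's in-place mutation).
import Mathlib
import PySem

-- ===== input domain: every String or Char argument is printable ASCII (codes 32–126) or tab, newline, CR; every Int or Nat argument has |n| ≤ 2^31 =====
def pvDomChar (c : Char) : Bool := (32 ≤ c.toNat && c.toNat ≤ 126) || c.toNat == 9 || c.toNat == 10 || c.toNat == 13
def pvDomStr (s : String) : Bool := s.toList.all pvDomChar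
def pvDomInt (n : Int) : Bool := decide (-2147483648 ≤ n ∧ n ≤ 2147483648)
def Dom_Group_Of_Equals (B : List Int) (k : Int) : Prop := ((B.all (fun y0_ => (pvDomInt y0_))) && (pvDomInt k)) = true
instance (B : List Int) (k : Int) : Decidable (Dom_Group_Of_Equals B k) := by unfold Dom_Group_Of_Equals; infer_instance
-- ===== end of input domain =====

-- B answers by hash-map frequency counting instead of A's sorted-run scan; both Pythons sort the
-- argument in place (B only to preserve that mutation), the proved equivalence is about the return value.

-- ===== PORT A =====
-- A's while loop: i = start of the current run, j = scan index; indices stay in range, so B[i]/B[j] is getD.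
def grpLoop (B : List Int) (k : Int) (i j : Nat) : Bool :=
  if j < B.length then
    if B.getD i 0 = B.getD j 0 then
      if ((j : Int) - (i : Int)) + 1 ≥ k then true
      else grpLoop B k i (j + 1)
    else grpLoop B k j (j + 1)
  else false
termination_by B.length - j

def Group_Of_Equals (B : List Int) (k : Int) : Bool :=
  let S := PySem.List.sorted B (fun x => x)
  grpLoop S k 0 1

-- ===== PORT B =====
def Group_Of_Equals_alt (B : List Int) (k : Int) : Bool :=
  let S := PySem.List.sorted B (fun x => x)
  let counts := S.foldl (fun d x => d.insert x (d.getD x 0 + 1)) (PySem.Dict.empty : PySem.Dict Int Int)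
  counts.values.any (fun c => decide ((2 : Int) ≤ c) && decide (k ≤ c))

-- ===== PRECONDITION & SPEC =====
def Spec_Group_Of_Equals (B : List Int) (k : Int) (out : Bool) : Prop := out = Group_Of_Equals_alt B k
instance (B : List Int) (k : Int) (out : Bool) : Decidable (Spec_Group_Of_Equals B k out) := by unfold Spec_Group_Of_Equals; infer_instance

-- ===== CLAIM (what is proved, stated in full; the proofs are below) =====
def Claim_equal_Group_Of_Equals : Prop := ∀ (B : List Int) (k : Int), Dom_Group_Of_Equals B k → Spec_Group_Of_Equals B k (Group_Of_Equals B k)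

-- ===== LEMMAS AND PROOFS =====

-- On a (≤)-sorted list, getD is monotone in the index (for in-range indices).
lemma sorted_getD_le (S : List Int) (hs : S.Pairwise (· ≤ ·)) (p q : Nat)
    (hpq : p ≤ q) (hq : q < S.length) : S.getD p 0 ≤ S.getD q 0 := by
  rcases Nat.lt_or_ge p q with h | h
  · have := (List.pairwise_iff_getElem.mp hs) p q (lt_trans h hq) hq h
    rwa [List.getD_eq_getElem _ _ (lt_trans h hq), List.getD_eq_getElem _ _ hq]
  · have : p = q := le_antisymm hpq h
    simp [this]

-- Invariant characterisation of A's while loop: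
--  i < j, S[i..j-1] is a constant run, i is a run start, and no window of width M ending before j matches.
lemma grpLoop_iff (S : List Int) (k : Int) (M : Nat)
    (hM : (M : Int) = max k 2) (hs : S.Pairwise (· ≤ ·)) :
    ∀ (i j : Nat), i < j →
    (∀ t, i ≤ t → t < j → S.getD t 0 = S.getD i 0) →
    (i = 0 ∨ S.getD (i - 1) 0 < S.getD i 0) →
    (∀ a, a + M ≤ j → S.getD a 0 ≠ S.getD (a + M - 1) 0) →
    (grpLoop S k i j = true ↔
      ∃ a, a + M ≤ S.length ∧ S.getD a 0 = S.getD (a + M - 1) 0) := by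
  have hM2 : 2 ≤ M := by omega
  intro i j
  induction hf : S.length - j using Nat.strong_induction_on generalizing i j with
  | _ f IH =>
  intro hij hrun hstart hnowin
  rw [grpLoop]
  by_cases hjlt : j < S.length
  · rw [if_pos hjlt]
    by_cases hEq : S.getD i 0 = S.getD j 0
    · rw [if_pos hEq]
      by_cases hk : ((j : Int) - (i : Int)) + 1 ≥ k
      · rw [if_pos hk]
        simp only [true_iff]
        have hMle : i + M ≤ j + 1 := by omega
        refine ⟨j + 1 - M, by omega, ?_⟩
        have ha1 : i ≤ j + 1 - M := by omega
        have ha2 : j + 1 - M ≤ j := by omega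
        have h1 : S.getD i 0 ≤ S.getD (j + 1 - M) 0 := by
          rcases Nat.lt_or_ge (j + 1 - M) j with h | h
          · have := sorted_getD_le S hs i (j + 1 - M) ha1 (by omega)
            exact this
          · have : j + 1 - M = j := by omega
            rw [this]; exact le_of_eq hEq
        have h2 : S.getD (j + 1 - M) 0 ≤ S.getD j 0 := sorted_getD_le S hs _ _ ha2 hjlt
        have hj' : j + 1 - M + M - 1 = j := by omega
        rw [hj']
        omega
      · rw [if_neg hk]
        have hlt : j + 1 < i + M := by omega
        refine IH (S.length - (j + 1)) (by omega) i (j + 1) rfl (by omega) ?_ hstart ?_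
        · intro t ht1 ht2
          rcases Nat.lt_or_ge t j with h | h
          · exact hrun t ht1 h
          · have : t = j := by omega
            rw [this]; exact hEq.symm
        · intro a ha
          rcases Nat.lt_or_ge (a + M) (j + 1) with h | h
          · exact hnowin a (by omega)
          · have haj : a + M = j + 1 := by omega
            have hai : a < i := by omega
            have hi1 : 1 ≤ i := by omega
            have hc1 : S.getD a 0 ≤ S.getD (i - 1) 0 :=
              sorted_getD_le S hs a (i - 1) (by omega) (by omega)
            have hc2 : S.getD (i - 1) 0 < S.getD i 0 := by
              rcases hstart with h0 | h0
              · omega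
              · exact h0
            have hc3 : S.getD i 0 ≤ S.getD j 0 := le_of_eq hEq
            have : a + M - 1 = j := by omega
            rw [this]; omega
    · rw [if_neg hEq]
      have hle : S.getD i 0 ≤ S.getD j 0 := sorted_getD_le S hs i j (le_of_lt hij) hjlt
      have hlt' : S.getD i 0 < S.getD j 0 := lt_of_le_of_ne hle hEq
      refine IH (S.length - (j + 1)) (by omega) j (j + 1) rfl (by omega) ?_ ?_ ?_
      · intro t ht1 ht2
        have : t = j := by omega
        rw [this]
      · right
        have : S.getD (j - 1) 0 = S.getD i 0 := hrun (j - 1) (by omega) (by omega)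
        rw [this]; exact hlt'
      · intro a ha
        rcases Nat.lt_or_ge (a + M) (j + 1) with h | h
        · exact hnowin a (by omega)
        · have haj : a + M = j + 1 := by omega
          have hend : a + M - 1 = j := by omega
          rw [hend]
          rcases Nat.lt_or_ge a i with hai | hai
          · have hi1 : 1 ≤ i := by omega
            have hc1 : S.getD a 0 ≤ S.getD (i - 1) 0 :=
              sorted_getD_le S hs a (i - 1) (by omega) (by omega)
            have hc2 : S.getD (i - 1) 0 < S.getD i 0 := by
              rcases hstart with h0 | h0
              · omega
              · exact h0
            omega
          · have : S.getD a 0 = S.getD i 0 := hrun a hai (by omega)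
            rw [this]; exact hEq
  · rw [if_neg hjlt]
    simp only [Bool.false_eq_true, false_iff]
    rintro ⟨a, ha, haeq⟩
    exact hnowin a (by omega) haeq

-- On a sorted list, if the entry at index t already exceeds v, at most t copies of v exist.
lemma count_le_of_getD_gt (S : List Int) (hs : S.Pairwise (· ≤ ·)) (v : Int) (t : Nat)
    (ht : t < S.length) (hv : v < S.getD t 0) : S.count v ≤ t := by
  have hsplit : S = S.take t ++ S.drop t := (List.take_append_drop t S).symm
  have hdrop : (S.drop t).count v = 0 := by
    rw [List.count_eq_zero]
    intro hy
    rcases List.mem_iff_getElem.mp hy with ⟨i, hi, hiy⟩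
    have hlen : t + i < S.length := by
      have := hi; simp [List.length_drop] at this; omega
    have hyv : v = S.getD (t + i) 0 := by
      rw [List.getD_eq_getElem _ _ hlen, ← hiy, List.getElem_drop]
    have := sorted_getD_le S hs t (t + i) (by omega) hlen
    omega
  have htake : (S.take t).count v ≤ t := by
    calc (S.take t).count v ≤ (S.take t).length := List.count_le_length
    _ ≤ t := by simp [List.length_take]
  calc S.count v = (S.take t ++ S.drop t).count v := by rw [← hsplit]
  _ = (S.take t).count v + (S.drop t).count v := List.count_append ..
  _ ≤ t := by omega

-- A matching window yields M copies of its value.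
lemma count_of_window (S : List Int) (hs : S.Pairwise (· ≤ ·)) (M a : Nat) (hM : 2 ≤ M)
    (ha : a + M ≤ S.length) (heq : S.getD a 0 = S.getD (a + M - 1) 0) :
    M ≤ S.count (S.getD a 0) := by
  set v := S.getD a 0 with hv
  have hrep : (S.drop a).take M = List.replicate M v := by
    rw [List.eq_replicate_iff]
    constructor
    · simp [List.length_take, List.length_drop]; omega
    · intro b hb
      rcases List.mem_iff_getElem.mp hb with ⟨i, hi, hib⟩
      have hiM : i < M := by
        have := hi; simp [List.length_take, List.length_drop] at this; omega
      have hlen : a + i < S.length := by omega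
      have hbeq : b = S.getD (a + i) 0 := by
        rw [List.getD_eq_getElem _ _ hlen, ← hib]
        simp [List.getElem_take, List.getElem_drop]
      have h1 : v ≤ S.getD (a + i) 0 := sorted_getD_le S hs a (a + i) (by omega) hlen
      have h2 : S.getD (a + i) 0 ≤ S.getD (a + M - 1) 0 :=
        sorted_getD_le S hs (a + i) (a + M - 1) (by omega) (by omega)
      omega
  have hsub : List.Sublist ((S.drop a).take M) S := (List.take_sublist ..).trans (List.drop_sublist ..)
  calc M = ((S.drop a).take M).count v := by rw [hrep]; simp
  _ ≤ S.count v := hsub.count_le v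

-- M copies of v in a sorted list yield a constant block of length M.
lemma window_of_count (v : Int) (M : Nat) (hM1 : 1 ≤ M) :
    ∀ (S : List Int), S.Pairwise (· ≤ ·) → M ≤ S.count v →
    ∃ a, a + M ≤ S.length ∧ ∀ t, t < M → S.getD (a + t) 0 = v := by
  intro S
  induction S with
  | nil => intro _ hc; simp at hc; omega
  | cons x rest ih =>
    intro hs hc
    have hrest : rest.Pairwise (· ≤ ·) := hs.of_cons
    by_cases hxv : x = v
    · refine ⟨0, ?_, ?_⟩
      · have := List.count_le_length (l := x :: rest) (a := v); omega
      · intro t htM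
        have htlen : t < (x :: rest).length := by
          have := List.count_le_length (l := x :: rest) (a := v); omega
        by_contra hne
        have h0 : (x :: rest).getD 0 0 = v := by simp [hxv]
        have hle : v ≤ (x :: rest).getD t 0 := by
          have := sorted_getD_le (x :: rest) hs 0 t (by omega) htlen
          omega
        have hgt : v < (x :: rest).getD t 0 := by
          rcases lt_or_eq_of_le hle with h | h
          · exact h
          · exact absurd h.symm (by simpa using hne)
        have := count_le_of_getD_gt (x :: rest) hs v t htlen hgt
        omega
    · have hc' : M ≤ rest.count v := by
        rw [List.count_cons_of_ne (by simpa using hxv)] at hc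
        exact hc
      rcases ih hrest hc' with ⟨a, ha, hrun⟩
      refine ⟨a + 1, by simp; omega, ?_⟩
      intro t htM
      have : (x :: rest).getD (a + 1 + t) 0 = rest.getD (a + t) 0 := by
        have hidx : a + 1 + t = (a + t) + 1 := by omega
        rw [hidx]; simp
      rw [this]; exact hrun t htM

-- B's counter pass answers the multiplicity question.
lemma alt_iff (B : List Int) (k : Int) :
    (Group_Of_Equals_alt B k = true ↔
      ∃ v ∈ PySem.List.sorted B (fun x => x),
        (2 : Int) ≤ ((PySem.List.sorted B (fun x => x)).count v : Int) ∧
        k ≤ ((PySem.List.sorted B (fun x => x)).count v : Int)) := by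
  set S := PySem.List.sorted B (fun x => x) with hS
  have hz : Group_Of_Equals_alt B k
      = (PySem.Dict.counter S).values.any (fun c => decide ((2 : Int) ≤ c) && decide (k ≤ c)) := by
    unfold Group_Of_Equals_alt
    rw [← hS, ← PySem.Dict.foldl_insert_getD_add_one_eq_counter]
  rw [hz]
  have hvals : (PySem.Dict.counter S).values
      = (PySem.Set.ofList S).map (fun v => ((S.count v : Int))) := by
    show ((PySem.Dict.counter S).items.map Prod.snd) = _
    rw [PySem.Dict.items_counter, List.map_map]
    rfl
  rw [hvals]
  simp only [List.any_eq_true, List.mem_map, Bool.and_eq_true, decide_eq_true_eq]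
  constructor
  · rintro ⟨c, ⟨v, hv, rfl⟩, h2, hk⟩
    exact ⟨v, (PySem.Set.mem_ofList _ _).mp hv, h2, hk⟩
  · rintro ⟨v, hv, h2, hk⟩
    exact ⟨(S.count v : Int), ⟨v, (PySem.Set.mem_ofList _ _).mpr hv, rfl⟩, h2, hk⟩

-- ===== VERDICT (by name: the statement is the Claim_ definition above) =====
theorem Group_Of_Equals_spec : Claim_equal_Group_Of_Equals := by
  intro B k _
  unfold Spec_Group_Of_Equals
  set M : Nat := (max k 2).toNat with hMdef
  have hM : (M : Int) = max k 2 := by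
    rw [hMdef]; exact Int.toNat_of_nonneg (by omega)
  have hM2 : 2 ≤ M := by omega
  rw [Bool.eq_iff_iff, alt_iff B k]
  unfold Group_Of_Equals
  set S := PySem.List.sorted B (fun x => x) with hS
  have hs : S.Pairwise (· ≤ ·) := PySem.List.sorted_pairwise B (fun x => x)
  have hA : (grpLoop S k 0 1 = true ↔
      ∃ a, a + M ≤ S.length ∧ S.getD a 0 = S.getD (a + M - 1) 0) :=
    grpLoop_iff S k M hM hs 0 1 (by omega)
      (by intro t ht1 ht2; have : t = 0 := by omega
          rw [this])
      (Or.inl rfl)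
      (by intro a ha; omega)
  rw [hA]
  constructor
  · rintro ⟨a, ha, heq⟩
    have hcnt := count_of_window S hs M a hM2 ha heq
    have halen : a < S.length := by omega
    refine ⟨S.getD a 0, ?_, ?_, ?_⟩
    · rw [List.getD_eq_getElem _ _ halen]; exact List.getElem_mem halen
    · have : (M : Int) ≤ (S.count (S.getD a 0) : Int) := by exact_mod_cast hcnt
      omega
    · have : (M : Int) ≤ (S.count (S.getD a 0) : Int) := by exact_mod_cast hcnt
      omega
  · rintro ⟨v, hv, h2, hk⟩
    have hMc : M ≤ S.count v := by
      have : (M : Int) ≤ (S.count v : Int) := by omega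
      exact_mod_cast this
    rcases window_of_count v M (by omega) S hs hMc with ⟨a, ha, hrun⟩
    refine ⟨a, ha, ?_⟩
    have h0 : S.getD (a + 0) 0 = v := hrun 0 (by omega)
    have h1 : S.getD (a + (M - 1)) 0 = v := hrun (M - 1) (by omega)
    have e0 : a + 0 = a := by omega
    have e1 : a + (M - 1) = a + M - 1 := by omega
    rw [e0] at h0; rw [e1] at h1
    rw [h0, h1]
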